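-- pv_equiv track=rewrite | github.com/oliverms1208/dumb-magic-stuff | precursor_golem_copy_calculator/PrecursorGolem.py | precursor_golem
-- ===== SOURCE A (Python) =====
-- def precursor_golem(precursors: int, golems: int, copies: int = 1) -> tuple[int, int]:
--     if golems == 0:
--         new_precursors = copies + (copies * precursors) * (precursors - 1)
--         new_golems = new_precursors * 2
--     else:
--         # Assuming you target a non-precursor with the copy spell
--         new_precursors = copies * precursors * precursors
--         new_golems = new_precursors * 2 + copies + (copies * precursors) * (golems - 1)
--     if copies == 1:
--         return (precursors + new_precursors, golems + new_golems)
--     else: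
--         return precursor_golem(precursors + new_precursors, golems + new_golems, copies - 1)
-- ===== SOURCE B (Python) =====
-- def precursor_golem(precursors: int, golems: int, copies: int = 1) -> tuple[int, int]:
--     for c in range(copies, 0, -1):
--         if golems == 0:
--             new_precursors = c + (c * precursors) * (precursors - 1)
--             new_golems = new_precursors * 2
--         else:
--             new_precursors = c * precursors * precursors
--             new_golems = new_precursors * 2 + c + (c * precursors) * (golems - 1)
--         precursors += new_precursors
--         golems += new_golems
--     return (precursors, golems)
-- ===== Notes on version B (the rewrite author's own statement) =====
-- stated objective: simpler
-- what changed: Replaced the tail recursion (and its duplicated final-step return) with a single uniform for-loop over range(copies, 0, -1) accumulating precursors/golems in place; the copies==1 special case disappears.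
import Mathlib
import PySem

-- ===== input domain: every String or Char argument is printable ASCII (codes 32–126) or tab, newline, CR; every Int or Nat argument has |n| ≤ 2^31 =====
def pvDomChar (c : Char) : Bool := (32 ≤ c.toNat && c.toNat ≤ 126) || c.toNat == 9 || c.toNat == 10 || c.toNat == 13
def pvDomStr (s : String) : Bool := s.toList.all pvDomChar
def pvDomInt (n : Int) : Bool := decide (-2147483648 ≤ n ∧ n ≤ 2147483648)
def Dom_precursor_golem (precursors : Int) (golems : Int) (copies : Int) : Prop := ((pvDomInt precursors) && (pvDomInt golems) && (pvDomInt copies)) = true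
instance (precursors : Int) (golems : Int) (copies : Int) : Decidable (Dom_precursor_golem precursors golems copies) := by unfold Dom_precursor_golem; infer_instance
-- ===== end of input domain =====

-- B replaces A's tail recursion (with a duplicated final-step return) by one uniform
-- loop over range(copies, 0, -1); equal to A for copies >= 1 (A raises RecursionError otherwise).


-- ===== PORT A =====
-- A is a tail recursion decrementing copies; ported with fuel copies.toNat (enough for
-- every copies ≥ 1, the inputs Pre_ admits; Python recurses forever / raises otherwise).
def precursor_golem_go : Nat → Int → Int → Int → Int × Int
  | 0, precursors, golems, _ => (precursors, golems)
  | fuel+1, precursors, golems, copies =>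
    let npg : Int × Int :=
      if golems = 0 then
        let np := copies + (copies * precursors) * (precursors - 1)
        (np, np * 2)
      else
        let np := copies * precursors * precursors
        (np, np * 2 + copies + (copies * precursors) * (golems - 1))
    if copies = 1 then (precursors + npg.1, golems + npg.2)
    else precursor_golem_go fuel (precursors + npg.1) (golems + npg.2) (copies - 1)

def precursor_golem (precursors : Int) (golems : Int) (copies : Int) : Int × Int :=
  precursor_golem_go copies.toNat precursors golems copies

-- ===== PORT B =====
-- one loop iteration of Source B: fold state (precursors, golems), loop variable c
def precursor_golem_step (st : Int × Int) (c : Int) : Int × Int :=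
  if st.2 = 0 then
    let np := c + (c * st.1) * (st.1 - 1)
    (st.1 + np, st.2 + np * 2)
  else
    let np := c * st.1 * st.1
    (st.1 + np, st.2 + (np * 2 + c + (c * st.1) * (st.2 - 1)))

def precursor_golem_alt (precursors : Int) (golems : Int) (copies : Int) : Int × Int :=
  (PySem.List.pyRange copies 0 (-1)).foldl precursor_golem_step (precursors, golems)

-- ===== PRECONDITION & SPEC =====
-- Pre_ excludes copies ≤ 0, on which Python A never reaches its base case and raises RecursionError.
def Pre_precursor_golem (precursors : Int) (golems : Int) (copies : Int) : Prop := 1 ≤ copies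
instance (precursors : Int) (golems : Int) (copies : Int) : Decidable (Pre_precursor_golem precursors golems copies) := by unfold Pre_precursor_golem; infer_instance

def pvWitness_precursor_golem : Int × Int × Int := (2, 3, 2)

def Spec_precursor_golem (precursors : Int) (golems : Int) (copies : Int) (out : Int × Int) : Prop := out = precursor_golem_alt precursors golems copies
instance (precursors : Int) (golems : Int) (copies : Int) (out : Int × Int) : Decidable (Spec_precursor_golem precursors golems copies out) := by unfold Spec_precursor_golem; infer_instance

-- ===== CLAIM (what is proved, stated in full; the proofs are below) =====
def Claim_equal_precursor_golem : Prop := ∀ (precursors : Int) (golems : Int) (copies : Int), Dom_precursor_golem precursors golems copies → Pre_precursor_golem precursors golems copies → Spec_precursor_golem precursors golems copies (precursor_golem precursors golems copies)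

-- ===== LEMMAS AND PROOFS =====

lemma range_map_shift (c : Int) (m : Nat) :
    (List.range (m+1)).map (fun k : Nat => c + -(k:Int)) =
      c :: (List.range m).map (fun k : Nat => c - 1 + -(k:Int)) := by
  rw [List.range_succ_eq_map, List.map_cons, List.map_map]
  refine congrArg₂ List.cons (by push_cast; ring) ?_
  exact List.map_congr_left (fun k _ => by simp [Function.comp]; ring)

lemma pyRange_neg_one_cons (c : Int) (h : 0 < c) :
    PySem.List.pyRange c 0 (-1) = c :: PySem.List.pyRange (c-1) 0 (-1) := by
  simp only [PySem.List.pyRange]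
  norm_num
  rw [if_pos h]
  by_cases h1 : 1 < c
  · rw [if_pos h1]
    have hm : c.toNat = (c.toNat - 1) + 1 := by omega
    rw [hm]
    have := range_map_shift c (c.toNat - 1)
    simpa using this
  · have hc1 : c = 1 := by omega
    subst hc1
    simp

lemma step_eq (p g c : Int) :
    precursor_golem_step (p, g) c =
      (let npg : Int × Int :=
        if g = 0 then
          let np := c + (c * p) * (p - 1)
          (np, np * 2)
        else
          let np := c * p * p
          (np, np * 2 + c + (c * p) * (g - 1))
      (p + npg.1, g + npg.2)) := by
  simp only [precursor_golem_step]
  split_ifs <;> simp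

lemma go_eq (n : Nat) : ∀ (p g c : Int), c.toNat = n + 1 →
    precursor_golem_go (n+1) p g c =
      (PySem.List.pyRange c 0 (-1)).foldl precursor_golem_step (p, g) := by
  induction n with
  | zero =>
    intro p g c hc
    have hc1 : c = 1 := by omega
    subst hc1
    rw [show PySem.List.pyRange 1 0 (-1) = [1] by decide,
        List.foldl_cons, List.foldl_nil, step_eq]
    simp [precursor_golem_go]
  | succ n ih =>
    intro p g c hc
    have hgt : 1 < c := by omega
    rw [pyRange_neg_one_cons c (by omega), List.foldl_cons, step_eq,
        ← ih _ _ (c-1) (by omega)]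
    simp only [precursor_golem_go]
    rw [if_neg (by omega)]

-- ===== VERDICT (by name: the statement is the Claim_ definition above) =====
theorem precursor_golem_spec : Claim_equal_precursor_golem := by
  intro p g c _ hpre
  have h1 : (1:Int) ≤ c := hpre
  have hc : c.toNat = (c.toNat - 1) + 1 := by omega
  show precursor_golem p g c = precursor_golem_alt p g c
  unfold precursor_golem precursor_golem_alt
  rw [hc]
  exact go_eq (c.toNat - 1) p g c hc
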